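-- pv_equiv track=rewrite | github.com/SonicField/soma | soma/extensions/markdown_emitter.py | data_title
-- ===== SOURCE A (Python) =====
-- from typing import List, Optional
--
-- def data_title(items: List[str]) -> str:
--     """
--     Format alternating items with bold (for data title pattern).
--
--     Args:
--         items: List of strings (must be even count)
--               Items at even indices (0, 2, 4...) are bolded
--               Items at odd indices (1, 3, 5...) are plain
--
--     Returns:
--         Single string with alternating bold formatting, items joined with spaces
--
--     Example:
--         >>> emitter.data_title(["Name", "Alice", "Age", "30"])
--         '**Name** Alice **Age** 30'
--
--     Note:
--         - Used by >md.dt builtin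
--         - Requires even number of items (pairs)
--         - Items joined with single space
--     """
--     if len(items) % 2 != 0:
--         raise ValueError(
--             f"data_title requires even number of items for alternating bold pairs, got {len(items)}"
--         )
--
--     formatted = []
--     for i, item in enumerate(items):
--         if i % 2 == 0:  # Even indices: 0, 2, 4... get bolded
--             formatted.append(f"**{item}**")
--         else:
--             formatted.append(item)
--
--     return " ".join(formatted)
-- ===== SOURCE B (Python) =====
-- def data_title(items):
--     if len(items) % 2 != 0:
--         raise ValueError(
--             f"data_title requires even number of items for alternating bold pairs, got {len(items)}"
--         )
--     it = iter(items)
--     chunks = [f"**{key}** {value}" for key, value in zip(it, it)]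
--     return " ".join(chunks)
-- ===== Notes on version B (the rewrite author's own statement) =====
-- stated objective: idiomatic
-- what changed: B pairs consecutive items with zip over a single iterator and emits one '**key** value' chunk per pair, instead of A's indexed enumerate loop with an i % 2 parity branch producing two list entries per pair.
import Mathlib
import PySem

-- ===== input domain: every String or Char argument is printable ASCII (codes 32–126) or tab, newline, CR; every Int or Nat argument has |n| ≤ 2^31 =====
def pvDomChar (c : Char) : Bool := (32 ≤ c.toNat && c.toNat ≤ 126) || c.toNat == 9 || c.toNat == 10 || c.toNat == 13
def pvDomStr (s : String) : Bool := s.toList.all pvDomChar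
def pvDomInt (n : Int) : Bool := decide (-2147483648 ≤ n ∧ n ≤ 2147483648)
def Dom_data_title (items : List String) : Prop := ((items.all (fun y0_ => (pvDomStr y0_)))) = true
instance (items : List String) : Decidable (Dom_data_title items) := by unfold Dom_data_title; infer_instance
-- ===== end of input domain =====

-- B replaces A's enumerate loop with its i % 2 parity branch by a recursion that consumes the list
-- two items at a time, emitting one "**key** value" chunk per pair (an idiomatic pairwise pass).

-- ===== PORT A =====
-- the odd-length guard raises ValueError in Python; those inputs are excluded by Pre_ (port returns "")
def data_title (items : List String) : String :=
  if PySem.Int.mod (PySem.List.len items) 2 ≠ 0 then ""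
  else
    let formatted := (PySem.List.enumerate items 0).foldl
      (fun acc p => if PySem.Int.mod p.1 2 = 0 then acc ++ ["**" ++ p.2 ++ "**"] else acc ++ [p.2]) []
    PySem.Str.join " " formatted

-- ===== PORT B =====
-- chunks(rest): one "**key** value" chunk per pair (the lone-leftover case a singleton would hit,
-- unreachable under the even-length guard, yields [])
def data_title_chunks : List String → List String
  | k :: v :: rest => ("**" ++ k ++ "** " ++ v) :: data_title_chunks rest
  | _ => []

def data_title_alt (items : List String) : String :=
  if PySem.Int.mod (PySem.List.len items) 2 ≠ 0 then ""
  else PySem.Str.join " " (data_title_chunks items)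

-- ===== PRECONDITION & SPEC =====
-- Pre_ excludes odd-length lists, on which the Python A (and B) raise ValueError
def Pre_data_title (items : List String) : Prop := items.length % 2 = 0
instance (items : List String) : Decidable (Pre_data_title items) := by unfold Pre_data_title; infer_instance
def pvWitness_data_title : List String := ["Name", "Alice", "Age", "30"]

def Spec_data_title (items : List String) (out : String) : Prop := out = data_title_alt items
instance (items : List String) (out : String) : Decidable (Spec_data_title items out) := by unfold Spec_data_title; infer_instance

-- ===== CLAIM (what is proved, stated in full; the proofs are below) =====
def Claim_equal_data_title : Prop := ∀ (items : List String), Dom_data_title items → Pre_data_title items → Spec_data_title items (data_title items)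

-- ===== LEMMAS AND PROOFS =====

-- A's per-item formatter, named for the proofs
def pvG (p : Int × String) : String :=
  if PySem.Int.mod p.1 2 = 0 then "**" ++ p.2 ++ "**" else p.2

lemma pvG_even {s : Int} (h : s % 2 = 0) (x : String) : pvG (s, x) = "**" ++ x ++ "**" := by
  have hm : PySem.Int.mod s 2 = 0 := by
    rw [PySem.Int.mod_eq_emod_of_pos (show (0:Int) < 2 by norm_num)]; omega
  show (if PySem.Int.mod s 2 = 0 then "**" ++ x ++ "**" else x) = "**" ++ x ++ "**"
  rw [if_pos hm]

lemma pvG_odd {s : Int} (h : s % 2 = 1) (x : String) : pvG (s, x) = x := by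
  have hm : PySem.Int.mod s 2 ≠ 0 := by
    rw [PySem.Int.mod_eq_emod_of_pos (show (0:Int) < 2 by norm_num)]; omega
  show (if PySem.Int.mod s 2 = 0 then "**" ++ x ++ "**" else x) = x
  rw [if_neg hm]

-- A's fold only ever appends a singleton: it is a map by pvG over the enumeration
lemma data_title_fold_eq_map (items : List String) (acc : List String) :
    (PySem.List.enumerate items 0).foldl
      (fun acc p => if PySem.Int.mod p.1 2 = 0 then acc ++ ["**" ++ p.2 ++ "**"] else acc ++ [p.2]) acc
    = acc ++ (PySem.List.enumerate items 0).map pvG := by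
  have hf : (fun (acc : List String) p =>
      if PySem.Int.mod p.1 2 = 0 then acc ++ ["**" ++ p.2 ++ "**"] else acc ++ [p.2])
      = fun acc p => acc ++ [pvG p] := by
    funext acc p
    unfold pvG
    by_cases h : PySem.Int.mod p.1 2 = 0
    · rw [if_pos h, if_pos h]
    · rw [if_neg h, if_neg h]
  rw [hf, PySem.List.foldl_append_singleton_eq_map]

-- joining the pvG-map of an even-length enumeration equals joining B's pairwise chunks
lemma data_title_join_eq : ∀ (items : List String) (s : Int),
    items.length % 2 = 0 → s % 2 = 0 →
    PySem.Str.join " " ((PySem.List.enumerate items s).map pvG)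
    = PySem.Str.join " " (data_title_chunks items)
  | [], _, _, _ => rfl
  | [x], _, hlen, _ => by simp at hlen
  | k :: v :: rest, s, hlen, hs => by
    have hrest : rest.length % 2 = 0 := by
      simp only [List.length_cons] at hlen; omega
    have ihx := congrArg String.toList
      (data_title_join_eq rest (s + 1 + 1) hrest (by omega))
    rw [PySem.List.enumerate_cons, PySem.List.enumerate_cons]
    simp only [List.map_cons, pvG_even hs, pvG_odd (by omega : (s + 1) % 2 = 1)]
    apply String.ext
    simp only [PySem.Str.toList_join, List.map_cons, data_title_chunks] at ihx ⊢
    rw [PySem.Chars.join_cons_cons]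
    cases rest with
    | nil =>
      simp only [PySem.List.enumerate_nil, data_title_chunks, List.map_nil,
        PySem.Chars.join_singleton]
      simp [String.toList_append, show ("**" : String).toList = ['*','*'] from rfl,
        show ("** " : String).toList = ['*','*',' '] from rfl,
        show (" " : String).toList = [' '] from rfl]
    | cons a tail =>
      cases tail with
      | nil => simp at hrest
      | cons b tl =>
        rw [PySem.List.enumerate_cons] at ihx ⊢
        simp only [data_title_chunks, List.map_cons] at ihx ⊢
        rw [PySem.Chars.join_cons_cons, PySem.Chars.join_cons_cons]
        rw [ihx]
        simp [String.toList_append, show ("**" : String).toList = ['*','*'] from rfl,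
          show ("** " : String).toList = ['*','*',' '] from rfl,
          show (" " : String).toList = [' '] from rfl]

-- ===== VERDICT (by name: the statement is the Claim_ definition above) =====
theorem data_title_spec : Claim_equal_data_title := by
  intro items _ hpre
  unfold Spec_data_title data_title data_title_alt
  have hne : ¬ PySem.Int.mod (PySem.List.len items) 2 ≠ 0 := by
    simp only [PySem.List.len_eq]
    rw [PySem.Int.mod_eq_emod_of_pos (show (0:Int) < 2 by norm_num)]
    unfold Pre_data_title at hpre
    omega
  rw [if_neg hne, if_neg hne]
  simp only []
  rw [data_title_fold_eq_map, List.nil_append]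
  exact data_title_join_eq items 0 hpre (by omega)
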